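-- pv_equiv track=rewrite | github.com/VincenzoRocchi/DM | DM2/functions.py | find_out
-- ===== SOURCE A (Python) =====
-- def highes_corr(cor_list, col_names):
--     #find sublist with highest len
--     max_len = 0
--     max_index = 0
--     for i in range(len(cor_list)):
--         if len(cor_list[i]) > max_len:
--             max_len = len(cor_list[i])
--             max_index = i
--     if max_len == 0:
--         return False, False
--     return col_names[max_index], max_index
--
-- def modify_list(col_name, cor_list, max_index):
--     for i in range(len(cor_list)):
--         if col_name in cor_list[i]:
--             cor_list[i].remove(col_name)
--     cor_list[max_index] = []
--     return cor_list
--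
-- def find_out(corr_list, col_names):
--     out = []
--     while True:
--         col_name, max_index = highes_corr(corr_list, col_names)
--         if col_name == False:
--             break
--         corr_list = modify_list(col_name, corr_list, max_index)
--         out.append(col_name)
--     return out
-- ===== SOURCE B (Python) =====
-- # Inverted index (value -> indices) with incremental length/occurrence counters:
-- # each pass touches only the sublists containing the removed name instead of
-- # scanning/mutating every sublist.  Return-value equivalence only: A mutates the
-- # sublists of corr_list in place, B never mutates its arguments.
-- def find_out(corr_list, col_names):
--     n = len(corr_list)
--     lens = [len(s) for s in corr_list]
--     occ = {}   # (value, index) -> remaining occurrence count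
--     idx = {}   # value -> indices whose sublist contains it (each once)
--     j = 0
--     for sub in corr_list:
--         for v in sub:
--             if (v, j) in occ:
--                 occ[(v, j)] += 1
--             else:
--                 occ[(v, j)] = 1
--                 idx.setdefault(v, []).append(j)
--         j += 1
--     alive = [True] * n
--     out = []
--     while True:
--         best = 0
--         bi = 0
--         for j in range(n):
--             if lens[j] > best:
--                 best = lens[j]
--                 bi = j
--         if best == 0:
--             break
--         w = col_names[bi]
--         out.append(w)
--         alive[bi] = False
--         lens[bi] = 0
--         for j in idx.get(w, []):
--             c = occ.get((w, j), 0)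
--             if c > 0:
--                 occ[(w, j)] = c - 1
--                 if alive[j]:
--                     lens[j] -= 1
--     return out
-- ===== Notes on version B (the rewrite author's own statement) =====
-- stated objective: faster
-- what changed: A rescans and mutates every sublist each round (membership test + remove + re-len per sublist); B precomputes a value-to-row-indices inverted index with per-(value,row) occurrence counters and a maintained length array, so each round only touches the rows that actually contain the removed name.
-- outside the precondition, e.g. on find_out([['a', 'b'], ['a']], ['a']): A returns ['a'], B returns ['a']
import Mathlib
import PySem

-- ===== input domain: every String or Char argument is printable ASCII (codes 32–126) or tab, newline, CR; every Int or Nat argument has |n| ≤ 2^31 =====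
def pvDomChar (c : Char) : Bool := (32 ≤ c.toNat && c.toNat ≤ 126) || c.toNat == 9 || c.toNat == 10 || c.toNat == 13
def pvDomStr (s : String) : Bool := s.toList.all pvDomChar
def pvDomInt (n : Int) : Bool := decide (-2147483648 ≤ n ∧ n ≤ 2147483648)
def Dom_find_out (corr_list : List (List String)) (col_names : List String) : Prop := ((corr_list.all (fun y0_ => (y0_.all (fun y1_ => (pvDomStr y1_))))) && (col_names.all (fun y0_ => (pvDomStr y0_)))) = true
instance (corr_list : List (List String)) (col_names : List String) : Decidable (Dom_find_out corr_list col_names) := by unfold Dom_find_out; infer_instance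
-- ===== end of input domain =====

-- B replaces A's per-step scan-and-mutate of every sublist by a value→indices inverted index with
-- incremental length/occurrence counters (alternative algorithm; return-value equivalence only:
-- Python A mutates corr_list's sublists in place, B does not mutate its arguments).

-- ===== PORT A =====
-- 'if col_name in cor_list[i]: cor_list[i].remove(col_name)' for one sublist
def pvRemoveIfIn (w : String) (l : List String) : List String :=
  if w ∈ l then (PySem.List.remove? l w).getD l else l

-- modify_list: remove col_name once from every sublist, then empty the chosen one
def modifyListA (w : String) (cor : List (List String)) (mi : Nat) : List (List String) :=
  (cor.map (pvRemoveIfIn w)).set mi []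

-- highes_corr's scan: fold carrying (max_len, max_index), strict '>' keeps the first maximum
def hcA : List (List String) → Nat → Nat × Nat → Nat × Nat
  | [], _, acc => acc
  | l :: ls, i, acc => hcA ls (i + 1) (if l.length > acc.1 then (l.length, i) else acc)

-- the scan's result names an actual element (needed by find_out's termination)
theorem hcA_spec : ∀ (xs : List (List String)) (i : Nat) (acc : Nat × Nat),
    hcA xs i acc = acc ∨
      ∃ k, ∃ hk : k < xs.length, (hcA xs i acc).2 = i + k ∧ xs[k].length = (hcA xs i acc).1 := by
  intro xs
  induction xs with
  | nil => intro i acc; exact Or.inl rfl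
  | cons l ls ih =>
    intro i acc
    simp only [hcA]
    by_cases h : l.length > acc.1
    · rw [if_pos h]
      rcases ih (i + 1) (l.length, i) with h1 | ⟨k, hk, ha, hb⟩
      · right; exact ⟨0, by simp, by simp [h1], by simp [h1]⟩
      · right; exact ⟨k + 1, by simpa using Nat.succ_lt_succ hk, by omega, by simpa using hb⟩
    · rw [if_neg h]
      rcases ih (i + 1) acc with h1 | ⟨k, hk, ha, hb⟩
      · exact Or.inl h1
      · right; exact ⟨k + 1, by simpa using Nat.succ_lt_succ hk, by omega, by simpa using hb⟩

theorem pvRemoveIfIn_length_le (w : String) (l : List String) :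
    (pvRemoveIfIn w l).length ≤ l.length := by
  unfold pvRemoveIfIn
  split_ifs with h
  · rw [PySem.List.remove?_eq_some_erase l w h]
    simpa using List.length_erase_le
  · exact le_rfl

-- one round of modify_list strictly shrinks the total number of stored names
theorem modifyA_sum_lt (w : String) (cor : List (List String)) (mi : Nat)
    (h1 : mi < cor.length) (h2 : (cor.getD mi []).length ≠ 0) :
    ((modifyListA w cor mi).map List.length).sum < (cor.map List.length).sum := by
  unfold modifyListA
  induction cor generalizing mi with
  | nil => simp at h1
  | cons h t ih =>
    cases mi with
    | zero =>
      simp only [List.map_cons, List.set, List.map, List.sum_cons, List.length_nil]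
      have hle : ((t.map (pvRemoveIfIn w)).map List.length).sum ≤ (t.map List.length).sum := by
        rw [List.map_map]
        exact List.sum_le_sum (fun x _ => pvRemoveIfIn_length_le w x)
      have : h.length ≠ 0 := by simpa using h2
      omega
    | succ k =>
      simp only [List.map_cons, List.set, List.sum_cons]
      have hk : k < t.length := by simpa using h1
      have h2' : (t.getD k []).length ≠ 0 := by simpa using h2
      have := ih k hk h2'
      have := pvRemoveIfIn_length_le w h
      omega

-- find_out: the greedy while-loop as well-founded recursion on the total stored length;
-- Python's col_names[max_index] is pyGet? (none = IndexError, excluded by Pre_)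
def find_out (corr_list : List (List String)) (col_names : List String) : List String :=
  let p := hcA corr_list 0 (0, 0)
  if hp : p.1 = 0 then []
  else
    match PySem.List.pyGet? col_names (p.2 : Int) with
    | none => []
    | some w => w :: find_out (modifyListA w corr_list p.2) col_names
  termination_by (corr_list.map List.length).sum
  decreasing_by
    rcases hcA_spec corr_list 0 (0, 0) with h | ⟨k, hk, h2, h3⟩
    · exact absurd (congrArg Prod.fst h) hp
    · have hk' : (hcA corr_list 0 (0, 0)).2 < corr_list.length := by omega
      have hkk : (hcA corr_list 0 (0, 0)).2 = k := by omega
      have hp2 : (hcA corr_list 0 (0, 0)).1 ≠ 0 := hp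
      apply modifyA_sum_lt _ _ _ hk'
      rw [List.getD_eq_getElem _ _ hk']
      simp only [hkk]
      omega

-- ===== PORT B =====
-- the same argmax scan of Source B's while-loop, over the maintained lens array
def bScan : List Nat → Nat → Nat × Nat → Nat × Nat
  | [], _, acc => acc
  | l :: ls, j, acc => bScan ls (j + 1) (if l > acc.1 then (l, j) else acc)

theorem bScan_spec : ∀ (xs : List Nat) (i : Nat) (acc : Nat × Nat),
    bScan xs i acc = acc ∨
      ∃ k, ∃ hk : k < xs.length, (bScan xs i acc).2 = i + k ∧ xs[k] = (bScan xs i acc).1 := by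
  intro xs
  induction xs with
  | nil => intro i acc; exact Or.inl rfl
  | cons l ls ih =>
    intro i acc
    simp only [bScan]
    by_cases h : l > acc.1
    · rw [if_pos h]
      rcases ih (i + 1) (l, i) with h1 | ⟨k, hk, ha, hb⟩
      · right; exact ⟨0, by simp, by simp [h1], by simp [h1]⟩
      · right; exact ⟨k + 1, by simpa using Nat.succ_lt_succ hk, by omega, by simpa using hb⟩
    · rw [if_neg h]
      rcases ih (i + 1) acc with h1 | ⟨k, hk, ha, hb⟩
      · exact Or.inl h1
      · right; exact ⟨k + 1, by simpa using Nat.succ_lt_succ hk, by omega, by simpa using hb⟩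

-- one element of the index-building double loop (Source B's 'for v in sub')
def bInnerStep (j : Nat) (st : PySem.Dict (String × Nat) Nat × PySem.Dict String (List Nat))
    (v : String) : PySem.Dict (String × Nat) Nat × PySem.Dict String (List Nat) :=
  if st.1.contains (v, j) then (st.1.insert (v, j) (st.1.getD (v, j) 0 + 1), st.2)
  else (st.1.insert (v, j) 1, st.2.modify v [] (· ++ [j]))

-- the outer build loop with its running index j
def bBuild : List (List String) → Nat →
    PySem.Dict (String × Nat) Nat × PySem.Dict String (List Nat) →
    PySem.Dict (String × Nat) Nat × PySem.Dict String (List Nat)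
  | [], _, st => st
  | sub :: rest, j, st => bBuild rest (j + 1) (sub.foldl (bInnerStep j) st)

-- one j of Source B's 'for j in idx.get(w, [])' update pass (indices are Nat: all Python
-- indices here are nonnegative; lens[j] -= 1 only fires with lens[j] > 0, so Nat '-' is exact)
def bStepFold (w : String) (alive : List Bool) (st : List Nat × PySem.Dict (String × Nat) Nat)
    (j : Nat) : List Nat × PySem.Dict (String × Nat) Nat :=
  let c := st.2.getD (w, j) 0
  if 0 < c then
    let occ' := st.2.insert (w, j) (c - 1)
    if alive.getD j false then (st.1.set j (st.1.getD j 0 - 1), occ') else (st.1, occ')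
  else st

theorem pvSumSetSubLe (lens : List Nat) (j : Nat) :
    (lens.set j (lens.getD j 0 - 1)).sum ≤ lens.sum := by
  induction lens generalizing j with
  | nil => simp
  | cons a t ih =>
    cases j with
    | zero => simp only [List.set, List.sum_cons, List.getD_cons_zero]; omega
    | succ k =>
      simp only [List.set, List.sum_cons, List.getD_cons_succ]
      exact Nat.add_le_add_left (ih k) a

theorem bStepFold_sum_le (w : String) (alive : List Bool) :
    ∀ (js : List Nat) (lens : List Nat) (occ : PySem.Dict (String × Nat) Nat),
      (js.foldl (bStepFold w alive) (lens, occ)).1.sum ≤ lens.sum := by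
  intro js
  induction js with
  | nil => intro lens occ; exact le_rfl
  | cons j t ih =>
    intro lens occ
    have hstep : (bStepFold w alive (lens, occ) j).1.sum ≤ lens.sum := by
      dsimp only [bStepFold]
      split_ifs
      · exact pvSumSetSubLe lens j
      · exact le_rfl
      · exact le_rfl
    rcases hb : bStepFold w alive (lens, occ) j with ⟨lens1, occ1⟩
    rw [List.foldl_cons, hb]
    rw [hb] at hstep
    exact le_trans (ih lens1 occ1) hstep

theorem sum_set_zero_lt (lens : List Nat) (j : Nat) (h1 : j < lens.length)
    (h2 : lens.getD j 0 ≠ 0) : (lens.set j 0).sum < lens.sum := by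
  induction lens generalizing j with
  | nil => simp at h1
  | cons a t ih =>
    cases j with
    | zero =>
      simp only [List.set, List.sum_cons]
      have : a ≠ 0 := by simpa using h2
      omega
    | succ k =>
      simp only [List.set, List.sum_cons]
      have := ih k (by simpa using h1) (by simpa using h2)
      omega

-- Source B's while-loop as well-founded recursion on the sum of the maintained lengths
def bLoop (col_names : List String) (idx : PySem.Dict String (List Nat)) (lens : List Nat)
    (occ : PySem.Dict (String × Nat) Nat) (alive : List Bool) : List String :=
  let p := bScan lens 0 (0, 0)
  if hp : p.1 = 0 then []
  else
    match PySem.List.pyGet? col_names (p.2 : Int) with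
    | none => []
    | some w =>
      let alive' := alive.set p.2 false
      let st := (idx.getD w []).foldl (bStepFold w alive') (lens.set p.2 0, occ)
      w :: bLoop col_names idx st.1 st.2 alive'
  termination_by lens.sum
  decreasing_by
    rcases bScan_spec lens 0 (0, 0) with h | ⟨k, hk, h2, h3⟩
    · exact absurd (congrArg Prod.fst h) hp
    · have hk' : (bScan lens 0 (0, 0)).2 < lens.length := by omega
      have hkk : (bScan lens 0 (0, 0)).2 = k := by omega
      have hp2 : (bScan lens 0 (0, 0)).1 ≠ 0 := hp
      calc ((idx.getD w []).foldl (bStepFold w (alive.set (bScan lens 0 (0,0)).2 false))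
            (lens.set (bScan lens 0 (0,0)).2 0, occ)).1.sum
          ≤ (lens.set (bScan lens 0 (0,0)).2 0).sum := bStepFold_sum_le _ _ _ _ _
        _ < lens.sum := by
            refine sum_set_zero_lt _ _ hk' ?_
            rw [List.getD_eq_getElem _ _ hk']
            simp only [hkk]
            omega

def find_out_alt (corr_list : List (List String)) (col_names : List String) : List String :=
  let lens := corr_list.map List.length
  let st := bBuild corr_list 0 (PySem.Dict.empty, PySem.Dict.empty)
  bLoop col_names st.2 lens st.1 (List.replicate corr_list.length true)

-- ===== PRECONDITION & SPEC =====
-- Pre_ requires every index holding a nonempty correlation sublist to have a column name;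
-- outside it A's col_names[max_index] in highes_corr raises IndexError on essentially all such
-- inputs (on a few, the offending sublist is emptied by earlier removals before its index is
-- selected and A still returns — those excluded returns agree with B, see the claim's cites).
def Pre_find_out (corr_list : List (List String)) (col_names : List String) : Prop :=
  ∀ j, j < corr_list.length → corr_list.getD j [] ≠ [] → j < col_names.length
instance (corr_list : List (List String)) (col_names : List String) :
    Decidable (Pre_find_out corr_list col_names) := by unfold Pre_find_out; infer_instance

def pvWitness_find_out : List (List String) × List String :=
  ([["a", "b"], ["b"], []], ["x", "y", "z"])

def Spec_find_out (corr_list : List (List String)) (col_names : List String) (out : List String) : Prop := out = find_out_alt corr_list col_names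
instance (corr_list : List (List String)) (col_names : List String) (out : List String) : Decidable (Spec_find_out corr_list col_names out) := by unfold Spec_find_out; infer_instance

-- ===== CLAIM (what is proved, stated in full; the proofs are below) =====
def Claim_equal_find_out : Prop := ∀ (corr_list : List (List String)) (col_names : List String), Dom_find_out corr_list col_names → Pre_find_out corr_list col_names → Spec_find_out corr_list col_names (find_out corr_list col_names)

-- ===== LEMMAS AND PROOFS =====

-- the state relation between A's current corr_list and B's (lens, occ, idx, alive)
def pvInv (corr : List (List String)) (lens : List Nat) (occ : PySem.Dict (String × Nat) Nat)
    (idx : PySem.Dict String (List Nat)) (alive : List Bool) : Prop :=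
  lens = corr.map List.length ∧
  alive.length = corr.length ∧
  (∀ j, j < corr.length → alive.getD j false = false → corr.getD j [] = []) ∧
  (∀ v j, j < corr.length → alive.getD j false = true → occ.getD (v, j) 0 = (corr.getD j []).count v) ∧
  (∀ v j, j < corr.length → alive.getD j false = true → 0 < (corr.getD j []).count v → j ∈ idx.getD v []) ∧
  (∀ v, (idx.getD v []).Nodup) ∧
  (∀ v j, j ∈ idx.getD v [] → j < corr.length)

-- getD after set, with no bounds assumption
theorem pvGetDSet {α : Type} (l : List α) (i j : Nat) (v d : α) :
    (l.set i v).getD j d = if j = i ∧ i < l.length then v else l.getD j d := by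
  induction l generalizing i j with
  | nil => simp
  | cons a t ih =>
    cases i with
    | zero => cases j <;> simp
    | succ k =>
      cases j with
      | zero => simp
      | succ m => simpa using ih k m

-- getD through map for the two maps we take (length, removal)
theorem pvGetDMapLen (l : List (List String)) (j : Nat) :
    (l.map List.length).getD j 0 = (l.getD j []).length := by
  induction l generalizing j with
  | nil => simp
  | cons a t ih =>
    cases j with
    | zero => simp
    | succ n => simp only [List.map_cons, List.getD_cons_succ]; exact ih n

theorem pvGetDMapRm (w : String) (l : List (List String)) (j : Nat) :
    (l.map (pvRemoveIfIn w)).getD j [] = pvRemoveIfIn w (l.getD j []) := by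
  induction l generalizing j with
  | nil => simp [pvRemoveIfIn]
  | cons a t ih =>
    cases j with
    | zero => simp
    | succ n => simp only [List.map_cons, List.getD_cons_succ]; exact ih n

-- pvRemoveIfIn in closed form, its count and its length
theorem pvRmEq (w : String) (l : List String) :
    pvRemoveIfIn w l = if w ∈ l then l.erase w else l := by
  unfold pvRemoveIfIn
  split_ifs with h
  · rw [PySem.List.remove?_eq_some_erase l w h]; rfl
  · rfl

theorem pvRmCount (w v : String) (l : List String) :
    (pvRemoveIfIn w l).count v =
      if v = w ∧ w ∈ l then l.count w - 1 else l.count v := by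
  rw [pvRmEq]
  by_cases hm : w ∈ l
  · rw [if_pos hm]
    by_cases hv : v = w
    · subst hv; simp [hm, List.count_erase_self]
    · simp [hv, List.count_erase_of_ne hv]
  · simp [hm]

theorem pvRmLen (w : String) (l : List String) :
    (pvRemoveIfIn w l).length = if w ∈ l then l.length - 1 else l.length := by
  rw [pvRmEq]
  split_ifs with h
  · exact List.length_erase_of_mem h
  · rfl

-- two Nat lists agreeing on every getD are equal
theorem pvListEqOfGetD (l1 l2 : List Nat) (hlen : l1.length = l2.length)
    (h : ∀ j, l1.getD j 0 = l2.getD j 0) : l1 = l2 := by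
  apply List.ext_getElem hlen
  intro i h1 h2
  have := h i
  rwa [List.getD_eq_getElem _ _ h1, List.getD_eq_getElem _ _ h2] at this

-- A's scan and B's scan compute the same pair
theorem pvScanEq : ∀ (xs : List (List String)) (i : Nat) (acc : Nat × Nat),
    hcA xs i acc = bScan (xs.map List.length) i acc := by
  intro xs
  induction xs with
  | nil => intro i acc; rfl
  | cons l ls ih => intro i acc; simp only [List.map_cons, hcA, bScan, ih]

-- one bStepFold application, characterized pointwise
theorem pvStepLen (w : String) (alive : List Bool) (lens : List Nat)
    (occ : PySem.Dict (String × Nat) Nat) (j : Nat) :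
    (bStepFold w alive (lens, occ) j).1.length = lens.length := by
  dsimp only [bStepFold]; split_ifs <;> simp

theorem pvStepLens (w : String) (alive : List Bool) (lens : List Nat)
    (occ : PySem.Dict (String × Nat) Nat) (j j' : Nat) :
    (bStepFold w alive (lens, occ) j).1.getD j' 0 =
      if j' = j ∧ 0 < occ.getD (w, j) 0 ∧ alive.getD j false = true
      then lens.getD j' 0 - 1 else lens.getD j' 0 := by
  dsimp only [bStepFold]
  by_cases h1 : 0 < occ.getD (w, j) 0
  · rw [if_pos h1]
    by_cases h2 : alive.getD j false = true
    · rw [if_pos h2]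
      dsimp only
      rw [pvGetDSet]
      by_cases hj : j' = j
      · subst hj
        by_cases hl : j' < lens.length
        · rw [if_pos ⟨rfl, hl⟩, if_pos ⟨rfl, h1, h2⟩]
        · have hz : lens.getD j' 0 = 0 := List.getD_eq_default _ _ (by omega)
          rw [if_neg (fun h => hl h.2), if_pos ⟨rfl, h1, h2⟩, hz]
      · rw [if_neg (fun h => hj h.1), if_neg (fun h => hj h.1)]
    · rw [if_neg h2]
      dsimp only
      rw [if_neg (fun h => h2 h.2.2)]
  · rw [if_neg h1]
    dsimp only
    rw [if_neg (fun h => h1 h.2.1)]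

theorem pvStepOcc (w : String) (alive : List Bool) (lens : List Nat)
    (occ : PySem.Dict (String × Nat) Nat) (j : Nat) (v : String) (x : Nat) :
    (bStepFold w alive (lens, occ) j).2.getD (v, x) 0 =
      if v = w ∧ x = j ∧ 0 < occ.getD (w, j) 0
      then occ.getD (w, j) 0 - 1 else occ.getD (v, x) 0 := by
  dsimp only [bStepFold]
  by_cases h1 : 0 < occ.getD (w, j) 0
  · rw [if_pos h1]
    have main : (occ.insert (w, j) (occ.getD (w, j) 0 - 1)).getD (v, x) 0 =
        if v = w ∧ x = j ∧ 0 < occ.getD (w, j) 0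
        then occ.getD (w, j) 0 - 1 else occ.getD (v, x) 0 := by
      rw [PySem.Dict.getD_insert]
      by_cases hv : v = w
      · subst hv
        by_cases hx : x = j
        · subst hx; rw [if_pos rfl, if_pos ⟨rfl, rfl, h1⟩]
        · have hne : ((v, x) : String × Nat) ≠ (v, j) := by simp [hx]
          rw [if_neg hne, if_neg (fun h => hx h.2.1)]
      · have hne : ((v, x) : String × Nat) ≠ (w, j) := by simp [Prod.ext_iff, hv]
        rw [if_neg hne, if_neg (fun h => hv h.1)]
    by_cases h2 : alive.getD j false = true
    · rw [if_pos h2]; exact main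
    · rw [if_neg h2]; exact main
  · rw [if_neg h1]
    dsimp only
    rw [if_neg (fun h => h1 h.2.2)]

-- the whole update pass, characterized pointwise (js are the distinct indices touched)
theorem pvBFoldSpec (w : String) (alive : List Bool) :
    ∀ (js : List Nat), js.Nodup → ∀ (lens : List Nat) (occ : PySem.Dict (String × Nat) Nat),
      ((js.foldl (bStepFold w alive) (lens, occ)).1.length = lens.length) ∧
      (∀ j', (js.foldl (bStepFold w alive) (lens, occ)).1.getD j' 0 =
        if j' ∈ js ∧ 0 < occ.getD (w, j') 0 ∧ alive.getD j' false = true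
        then lens.getD j' 0 - 1 else lens.getD j' 0) ∧
      (∀ v x, (js.foldl (bStepFold w alive) (lens, occ)).2.getD (v, x) 0 =
        if v = w ∧ x ∈ js ∧ 0 < occ.getD (w, x) 0
        then occ.getD (w, x) 0 - 1 else occ.getD (v, x) 0) := by
  intro js
  induction js with
  | nil => intro _ lens occ; refine ⟨rfl, fun j' => by simp, fun v x => by simp⟩
  | cons j t ih =>
    intro hnd lens occ
    have hjt : j ∉ t := (List.nodup_cons.mp hnd).1
    have hndt : t.Nodup := (List.nodup_cons.mp hnd).2
    rcases hb : bStepFold w alive (lens, occ) j with ⟨lens1, occ1⟩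
    obtain ⟨ihl, ih1, ih2⟩ := ih hndt lens1 occ1
    have hl1 : ∀ j', lens1.getD j' 0 =
        if j' = j ∧ 0 < occ.getD (w, j) 0 ∧ alive.getD j false = true
        then lens.getD j' 0 - 1 else lens.getD j' 0 := by
      intro j'; rw [← pvStepLens w alive lens occ j j', hb]
    have ho1 : ∀ v x, occ1.getD (v, x) 0 =
        if v = w ∧ x = j ∧ 0 < occ.getD (w, j) 0
        then occ.getD (w, j) 0 - 1 else occ.getD (v, x) 0 := by
      intro v x; rw [← pvStepOcc w alive lens occ j v x, hb]
    have hlen1 : lens1.length = lens.length := by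
      rw [← pvStepLen w alive lens occ j, hb]
    rw [List.foldl_cons, hb]
    refine ⟨by rw [ihl, hlen1], ?_, ?_⟩
    · intro j'
      rw [ih1]
      by_cases hj : j' = j
      · subst hj
        rw [if_neg (fun h => hjt h.1), hl1]
        by_cases hc : 0 < occ.getD (w, j') 0 ∧ alive.getD j' false = true
        · rw [if_pos ⟨rfl, hc.1, hc.2⟩, if_pos ⟨List.mem_cons_self, hc.1, hc.2⟩]
        · rw [if_neg (fun h => hc ⟨h.2.1, h.2.2⟩), if_neg (fun h => hc ⟨h.2.1, h.2.2⟩)]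
      · have ho : occ1.getD (w, j') 0 = occ.getD (w, j') 0 := by
          rw [ho1]; simp [hj]
        have hl : lens1.getD j' 0 = lens.getD j' 0 := by rw [hl1]; simp [hj]
        rw [ho, hl]
        simp [List.mem_cons, hj]
    · intro v x
      rw [ih2]
      by_cases hx : x = j
      · subst hx
        rw [if_neg (fun h => hjt h.2.1), ho1]
        by_cases hv : v = w
        · subst hv
          by_cases hc : 0 < occ.getD (v, x) 0
          · rw [if_pos ⟨rfl, rfl, hc⟩, if_pos ⟨rfl, List.mem_cons_self, hc⟩]
          · rw [if_neg (fun h => hc h.2.2), if_neg (fun h => hc h.2.2)]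
        · rw [if_neg (fun h => hv h.1), if_neg (fun h => hv h.1)]
      · have ho : occ1.getD (w, x) 0 = occ.getD (w, x) 0 := by rw [ho1]; simp [hx]
        have ho' : occ1.getD (v, x) 0 = occ.getD (v, x) 0 := by rw [ho1]; simp [hx]
        rw [ho, ho']
        simp [List.mem_cons, hx]

theorem pvCountSnoc (pre : List String) (v v0 : String) :
    (pre ++ [v0]).count v = pre.count v + if v = v0 then 1 else 0 := by
  rw [List.count_append]
  by_cases h : v = v0 <;> simp [h, eq_comm]

theorem pvCountCons (rest : List String) (v v0 : String) :
    (v0 :: rest).count v = rest.count v + if v = v0 then 1 else 0 := by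
  by_cases h : v = v0 <;> simp [h, eq_comm]

-- one sublist of the build loop: occurrence counts at row j and the idx rows
theorem pvInnerSpec (j : Nat) : ∀ (sub : List String) (occ : PySem.Dict (String × Nat) Nat)
    (idx : PySem.Dict String (List Nat)) (pre : List String),
    (∀ v, occ.getD (v, j) 0 = pre.count v) →
    (∀ v, occ.contains (v, j) = decide (0 < pre.count v)) →
    ((∀ v, (sub.foldl (bInnerStep j) (occ, idx)).1.getD (v, j) 0 = (pre ++ sub).count v) ∧
     (∀ v x, x ≠ j → (sub.foldl (bInnerStep j) (occ, idx)).1.getD (v, x) 0 = occ.getD (v, x) 0) ∧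
     (∀ v x, x ≠ j → (sub.foldl (bInnerStep j) (occ, idx)).1.contains (v, x) = occ.contains (v, x)) ∧
     (∀ v, (sub.foldl (bInnerStep j) (occ, idx)).2.getD v [] =
        idx.getD v [] ++ if 0 < sub.count v ∧ pre.count v = 0 then [j] else [])) := by
  intro sub
  induction sub with
  | nil =>
    intro occ idx pre h1 h2
    exact ⟨fun v => by simpa using h1 v, fun v x _ => rfl, fun v x _ => rfl, fun v => by simp⟩
  | cons v0 rest ih =>
    intro occ idx pre h1 h2
    by_cases hc : 0 < pre.count v0
    · have hcontains : occ.contains (v0, j) = true := by rw [h2]; simpa using hc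
      have hstep : (v0 :: rest).foldl (bInnerStep j) (occ, idx) =
          rest.foldl (bInnerStep j) (occ.insert (v0, j) (occ.getD (v0, j) 0 + 1), idx) := by
        rw [List.foldl_cons]; dsimp only [bInnerStep]; rw [if_pos hcontains]
      have h1' : ∀ v, (occ.insert (v0, j) (occ.getD (v0, j) 0 + 1)).getD (v, j) 0 =
          (pre ++ [v0]).count v := by
        intro v
        rw [PySem.Dict.getD_insert, pvCountSnoc]
        by_cases hv : v = v0
        · subst hv; rw [if_pos rfl, h1]; simp
        · rw [if_neg (by simp [hv]), h1]; simp [hv]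
      have h2' : ∀ v, (occ.insert (v0, j) (occ.getD (v0, j) 0 + 1)).contains (v, j) =
          decide (0 < (pre ++ [v0]).count v) := by
        intro v
        rw [PySem.Dict.contains_insert, pvCountSnoc]
        by_cases hv : v = v0
        · subst hv; rw [hcontains]; simp
        · have : (((v, j) : String × Nat) == (v0, j)) = false := by simp [hv]
          rw [this, h2]; simp [hv]
      obtain ⟨c1, c3, c4, c5⟩ := ih _ idx (pre ++ [v0]) h1' h2'
      rw [hstep]
      refine ⟨fun v => by rw [c1 v]; simp, ?_, ?_, ?_⟩
      · intro v x hx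
        rw [c3 v x hx, PySem.Dict.getD_insert_of_ne _ _ _ (by simp [hx])]
      · intro v x hx
        rw [c4 v x hx, PySem.Dict.contains_insert]
        have : (((v, x) : String × Nat) == (v0, j)) = false := by simp [hx]
        rw [this]; simp
      · intro v
        rw [c5 v]
        congr 1
        by_cases hv : v = v0
        · subst hv
          rw [if_neg (by rw [pvCountSnoc]; simp), if_neg (by omega)]
        · rw [pvCountSnoc, pvCountCons]
          simp [hv]
    · have hc0 : pre.count v0 = 0 := by omega
      have hcontains : occ.contains (v0, j) = false := by rw [h2]; simp [hc0]
      have hstep : (v0 :: rest).foldl (bInnerStep j) (occ, idx) =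
          rest.foldl (bInnerStep j) (occ.insert (v0, j) 1, idx.modify v0 [] (· ++ [j])) := by
        rw [List.foldl_cons]; dsimp only [bInnerStep]; rw [if_neg (by simp [hcontains])]
      have h1' : ∀ v, (occ.insert (v0, j) 1).getD (v, j) 0 = (pre ++ [v0]).count v := by
        intro v
        rw [PySem.Dict.getD_insert, pvCountSnoc]
        by_cases hv : v = v0
        · subst hv; rw [if_pos rfl, hc0]; simp
        · rw [if_neg (by simp [hv]), h1]; simp [hv]
      have h2' : ∀ v, (occ.insert (v0, j) 1).contains (v, j) =
          decide (0 < (pre ++ [v0]).count v) := by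
        intro v
        rw [PySem.Dict.contains_insert, pvCountSnoc]
        by_cases hv : v = v0
        · subst hv; simp
        · have : (((v, j) : String × Nat) == (v0, j)) = false := by simp [hv]
          rw [this, h2]; simp [hv]
      obtain ⟨c1, c3, c4, c5⟩ := ih _ (idx.modify v0 [] (· ++ [j])) (pre ++ [v0]) h1' h2'
      rw [hstep]
      refine ⟨fun v => by rw [c1 v]; simp, ?_, ?_, ?_⟩
      · intro v x hx
        rw [c3 v x hx, PySem.Dict.getD_insert_of_ne _ _ _ (by simp [hx])]
      · intro v x hx
        rw [c4 v x hx, PySem.Dict.contains_insert]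
        have : (((v, x) : String × Nat) == (v0, j)) = false := by simp [hx]
        rw [this]; simp
      · intro v
        rw [c5 v, PySem.Dict.getD_modify]
        by_cases hv : v = v0
        · subst hv
          rw [if_pos rfl, if_neg (by rw [pvCountSnoc]; simp), if_pos (by rw [pvCountCons]; constructor <;> [simp; exact hc0] )]
          simp
        · rw [if_neg hv]
          congr 1
          rw [pvCountSnoc, pvCountCons]
          simp [hv]

-- the whole build loop, characterized against the original rows
theorem pvBuildSpec : ∀ (subs : List (List String)) (j0 : Nat)
    (occ : PySem.Dict (String × Nat) Nat) (idx : PySem.Dict String (List Nat)),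
    (∀ v x, j0 ≤ x → occ.getD (v, x) 0 = 0) →
    (∀ v x, j0 ≤ x → occ.contains (v, x) = false) →
    (∀ v x, x ∈ idx.getD v [] → x < j0) →
    (∀ v, (idx.getD v []).Nodup) →
    ((∀ v k, k < subs.length → (bBuild subs j0 (occ, idx)).1.getD (v, j0 + k) 0 = (subs.getD k []).count v) ∧
     (∀ v x, x < j0 → (bBuild subs j0 (occ, idx)).1.getD (v, x) 0 = occ.getD (v, x) 0) ∧
     (∀ v x, x ∈ (bBuild subs j0 (occ, idx)).2.getD v [] → x < j0 + subs.length) ∧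
     (∀ v k, k < subs.length → 0 < (subs.getD k []).count v → (j0 + k) ∈ (bBuild subs j0 (occ, idx)).2.getD v []) ∧
     (∀ v, ((bBuild subs j0 (occ, idx)).2.getD v []).Nodup) ∧
     (∀ v x, x ∈ idx.getD v [] → x ∈ (bBuild subs j0 (occ, idx)).2.getD v [])) := by
  intro subs
  induction subs with
  | nil =>
    intro j0 occ idx hocc hcont hidx hnd
    exact ⟨fun v k hk => by simp at hk, fun v x _ => rfl,
      fun v x hx => lt_of_lt_of_le (hidx v x hx) (by simp),
      fun v k hk => by simp at hk, hnd, fun v x hx => hx⟩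
  | cons sub rest ih =>
    intro j0 occ idx hocc hcont hidx hnd
    obtain ⟨i1, i3, i4, i5⟩ := pvInnerSpec j0 sub occ idx []
      (fun v => by rw [hocc v j0 le_rfl]; simp)
      (fun v => by rw [hcont v j0 le_rfl]; simp)
    rcases hinner : sub.foldl (bInnerStep j0) (occ, idx) with ⟨occ1, idx1⟩
    rw [hinner] at i1 i3 i4 i5
    have hb : bBuild (sub :: rest) j0 (occ, idx) = bBuild rest (j0 + 1) (occ1, idx1) := by
      simp only [bBuild, hinner]
    have hidx1 : ∀ v, idx1.getD v [] =
        idx.getD v [] ++ if 0 < sub.count v then [j0] else [] := by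
      intro v; rw [i5 v]; congr 1; simp
    obtain ⟨c1, c2, c3, c4, c5, c6⟩ := ih (j0 + 1) occ1 idx1
      (fun v x hx => by rw [i3 v x (by omega)]; exact hocc v x (by omega))
      (fun v x hx => by rw [i4 v x (by omega)]; exact hcont v x (by omega))
      (fun v x hx => by
        rw [hidx1 v] at hx
        rcases List.mem_append.mp hx with h | h
        · exact lt_trans (hidx v x h) (by omega)
        · rcases (by split_ifs at h <;> simp_all : x = j0) with rfl; omega)
      (fun v => by
        rw [hidx1 v]
        split_ifs with h
        · rw [List.nodup_append]
          exact ⟨hnd v, List.nodup_singleton _,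
            fun a ha b hb => by simp at hb; subst hb; exact Nat.ne_of_lt (hidx v a ha)⟩
        · simpa using hnd v)
    rw [hb]
    refine ⟨?_, ?_, ?_, ?_, c5, ?_⟩
    · intro v k hk
      cases k with
      | zero =>
        simp only [Nat.add_zero]
        rw [c2 v j0 (by omega), i1 v]
        simp
      | succ m =>
        have := c1 v m (by simpa using hk)
        rw [show j0 + (m + 1) = j0 + 1 + m by omega, this]
        simp
    · intro v x hx
      rw [c2 v x (by omega), i3 v x (by omega)]
    · intro v x hx
      have := c3 v x hx
      simpa [Nat.add_assoc, Nat.add_comm 1 rest.length] using this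
    · intro v k hk hcnt
      cases k with
      | zero =>
        simp only [Nat.add_zero]
        apply c6 v j0
        rw [hidx1 v]
        simp at hcnt
        simp [hcnt]
      | succ m =>
        have := c4 v m (by simpa using hk) (by simpa using hcnt)
        rw [show j0 + (m + 1) = j0 + 1 + m by omega]
        exact this
    · intro v x hx
      apply c6 v x
      rw [hidx1 v]
      exact List.mem_append_left _ hx

-- one loop iteration preserves the state relation
theorem pvInvStep (corr : List (List String)) (lens : List Nat)
    (occ : PySem.Dict (String × Nat) Nat) (idx : PySem.Dict String (List Nat))
    (alive : List Bool) (w : String) (mi : Nat)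
    (hmi : mi < corr.length) (hinv : pvInv corr lens occ idx alive) :
    pvInv (modifyListA w corr mi)
      ((idx.getD w []).foldl (bStepFold w (alive.set mi false)) (lens.set mi 0, occ)).1
      ((idx.getD w []).foldl (bStepFold w (alive.set mi false)) (lens.set mi 0, occ)).2
      idx (alive.set mi false) := by
  obtain ⟨h1, h2, h3, h4, h5, h6, h7⟩ := hinv
  obtain ⟨fl, f1, f2⟩ := pvBFoldSpec w (alive.set mi false) (idx.getD w []) (h6 w) (lens.set mi 0) occ
  have hlenL : lens.length = corr.length := by rw [h1]; simp
  have hlenC : (modifyListA w corr mi).length = corr.length := by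
    unfold modifyListA; simp
  have hcorrD : ∀ j, (modifyListA w corr mi).getD j [] =
      if j = mi then [] else pvRemoveIfIn w (corr.getD j []) := by
    intro j
    unfold modifyListA
    rw [pvGetDSet]
    by_cases hj : j = mi
    · rw [if_pos ⟨hj, by simpa using hmi⟩, if_pos hj]
    · rw [if_neg (fun h => hj h.1), if_neg hj, pvGetDMapRm]
  have haliveD : ∀ j, (alive.set mi false).getD j false =
      if j = mi then false else alive.getD j false := by
    intro j
    rw [pvGetDSet]
    by_cases hj : j = mi
    · rw [if_pos ⟨hj, by omega⟩, if_pos hj]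
    · rw [if_neg (fun h => hj h.1), if_neg hj]
  have hlensD : ∀ j, lens.getD j 0 = (corr.getD j []).length := by
    intro j; rw [h1, pvGetDMapLen]
  have hnilOf : ∀ j, j < corr.length → alive.getD j false = false → corr.getD j [] = [] := h3
  have haliveLT : ∀ j, alive.getD j false = true → j < corr.length := by
    intro j haj
    by_contra hge
    rw [List.getD_eq_default _ _ (by omega)] at haj
    exact Bool.false_ne_true haj
  refine ⟨?_, ?_, ?_, ?_, ?_, h6, ?_⟩
  · -- lens component
    apply pvListEqOfGetD
    · rw [fl]; simp [hlenL, hlenC]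
    · intro j
      rw [f1 j, pvGetDMapLen, hcorrD j]
      by_cases hj : j = mi
      · subst hj
        rw [if_neg (by rw [haliveD]; simp), if_pos rfl]
        rw [pvGetDSet, if_pos ⟨rfl, by omega⟩]
        rfl
      · have hset : (lens.set mi 0).getD j 0 = lens.getD j 0 := by
          rw [pvGetDSet, if_neg (fun h => hj h.1)]
        rw [if_neg hj]
        by_cases ha : alive.getD j false = true
        · have hjlt : j < corr.length := haliveLT j ha
          have hocc : occ.getD (w, j) 0 = (corr.getD j []).count w := h4 w j hjlt ha
          by_cases hw : w ∈ corr.getD j []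
          · have hcnt : 0 < (corr.getD j []).count w := List.count_pos_iff.mpr hw
            have hjs : j ∈ idx.getD w [] := h5 w j hjlt ha hcnt
            rw [if_pos ⟨hjs, by omega, by rw [haliveD, if_neg hj]; exact ha⟩, hset,
              hlensD, pvRmLen, if_pos hw]
          · have hcnt : (corr.getD j []).count w = 0 := by
              by_contra hne
              exact hw (List.count_pos_iff.mp (by omega))
            rw [if_neg (by intro hcond; omega), hset, hlensD, pvRmLen, if_neg hw]
        · have ha' : alive.getD j false = false := by
            cases hab : alive.getD j false
            · rfl
            · exact absurd hab ha
          have hnil : corr.getD j [] = [] := by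
            by_cases hjlt : j < corr.length
            · exact h3 j hjlt ha'
            · exact List.getD_eq_default _ _ (by omega)
          rw [if_neg (by
            intro hcond
            rw [haliveD, if_neg hj] at hcond
            exact ha hcond.2.2), hset, hlensD, hnil]
          simp [pvRmEq]
  · rw [hlenC]; simpa using h2
  · -- dead rows are empty
    intro j hj hfalse
    rw [hcorrD j]
    by_cases hjm : j = mi
    · rw [if_pos hjm]
    · rw [if_neg hjm]
      rw [haliveD, if_neg hjm] at hfalse
      rw [h3 j (by rwa [hlenC] at hj) hfalse]
      simp [pvRmEq]
  · -- occurrence counts of live rows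
    intro v j hj ha'
    rw [haliveD] at ha'
    by_cases hjm : j = mi
    · rw [if_pos hjm] at ha'; exact absurd ha' (by simp)
    · rw [if_neg hjm] at ha'
      have hjlt : j < corr.length := by rwa [hlenC] at hj
      rw [f2 v j, hcorrD j, if_neg hjm, pvRmCount]
      have hocc : occ.getD (w, j) 0 = (corr.getD j []).count w := h4 w j hjlt ha'
      have hoccv : occ.getD (v, j) 0 = (corr.getD j []).count v := h4 v j hjlt ha'
      by_cases hv : v = w
      · subst hv
        by_cases hw : v ∈ corr.getD j []
        · have hcnt : 0 < (corr.getD j []).count v := List.count_pos_iff.mpr hw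
          have hjs : j ∈ idx.getD v [] := h5 v j hjlt ha' hcnt
          rw [if_pos ⟨rfl, hjs, by omega⟩, if_pos ⟨rfl, hw⟩, hocc]
        · have hcnt : (corr.getD j []).count v = 0 := by
            by_contra hne
            exact hw (List.count_pos_iff.mp (by omega))
          rw [if_neg (by intro hcond; omega), if_neg (fun h => hw h.2), hoccv]
      · rw [if_neg (fun h => hv h.1), if_neg (fun h => hv h.1), hoccv]
  · -- positive counts still indexed
    intro v j hj ha' hcnt
    rw [haliveD] at ha'
    by_cases hjm : j = mi
    · rw [if_pos hjm] at ha'; exact absurd ha' (by simp)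
    · rw [if_neg hjm] at ha'
      have hjlt : j < corr.length := by rwa [hlenC] at hj
      rw [hcorrD j, if_neg hjm, pvRmCount] at hcnt
      by_cases hvw : v = w ∧ w ∈ corr.getD j []
      · rcases hvw with ⟨rfl, hw⟩
        rw [if_pos ⟨rfl, hw⟩] at hcnt
        exact h5 v j hjlt ha' (by omega)
      · rw [if_neg hvw] at hcnt
        exact h5 v j hjlt ha' hcnt
  · intro v j hjs
    rw [hlenC]
    exact h7 v j hjs

theorem pvMainLoop : ∀ (N : Nat) (corr : List (List String)) (col_names : List String)
    (lens : List Nat) (occ : PySem.Dict (String × Nat) Nat)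
    (idx : PySem.Dict String (List Nat)) (alive : List Bool),
    (corr.map List.length).sum ≤ N → pvInv corr lens occ idx alive →
    find_out corr col_names = bLoop col_names idx lens occ alive := by
  intro N
  induction N with
  | zero =>
    intro corr cn lens occ idx alive hsum hinv
    have hz : (hcA corr 0 (0, 0)).1 = 0 := by
      rcases hcA_spec corr 0 (0, 0) with h | ⟨k, hk, ha, hb⟩
      · rw [h]
      · have hmem : corr[k].length ∈ corr.map List.length :=
          List.mem_map_of_mem (List.getElem_mem hk)
        have hle := List.single_le_sum (fun (x : Nat) _ => Nat.zero_le x) _ hmem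
        omega
    have hz' : (bScan lens 0 (0, 0)).1 = 0 := by
      rw [hinv.1, ← pvScanEq]; exact hz
    rw [find_out, bLoop, dif_pos hz, dif_pos hz']
  | succ n ih =>
    intro corr cn lens occ idx alive hsum hinv
    have hscan : bScan lens 0 (0, 0) = hcA corr 0 (0, 0) := by
      rw [hinv.1, ← pvScanEq]
    rw [find_out, bLoop]
    by_cases hz : (hcA corr 0 (0, 0)).1 = 0
    · rw [dif_pos hz, dif_pos (by rw [hscan]; exact hz)]
    · rw [dif_neg hz, dif_neg (by rw [hscan]; exact hz), hscan]
      rcases hcA_spec corr 0 (0, 0) with h | ⟨k, hk, ha, hb⟩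
      · exact absurd (congrArg Prod.fst h) hz
      · have hmi : (hcA corr 0 (0, 0)).2 < corr.length := by omega
        have hlen0 : (corr.getD ((hcA corr 0 (0, 0)).2) []).length ≠ 0 := by
          rw [List.getD_eq_getElem _ _ hmi]
          have hkk : (hcA corr 0 (0, 0)).2 = k := by omega
          simp only [hkk]
          omega
        cases hw : PySem.List.pyGet? cn (((hcA corr 0 (0, 0)).2 : Nat) : Int) with
        | none => rfl
        | some w =>
          dsimp only
          congr 1
          have hsum' : ((modifyListA w corr ((hcA corr 0 (0, 0)).2)).map List.length).sum ≤ n := by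
            have := modifyA_sum_lt w corr _ hmi hlen0
            omega
          exact ih _ cn _ _ idx _ hsum'
            (pvInvStep corr lens occ idx alive w _ hmi hinv)

theorem pvInitInv (corr : List (List String)) :
    pvInv corr (corr.map List.length) (bBuild corr 0 (PySem.Dict.empty, PySem.Dict.empty)).1
      (bBuild corr 0 (PySem.Dict.empty, PySem.Dict.empty)).2
      (List.replicate corr.length true) := by
  obtain ⟨c1, c2, c3, c4, c5, c6⟩ := pvBuildSpec corr 0 PySem.Dict.empty PySem.Dict.empty
    (fun v x _ => PySem.Dict.getD_empty _ _)
    (fun v x _ => PySem.Dict.contains_empty _)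
    (fun v x hx => by rw [PySem.Dict.getD_empty] at hx; simp at hx)
    (fun v => by rw [PySem.Dict.getD_empty]; exact List.nodup_nil)
  refine ⟨rfl, by simp, ?_, ?_, ?_, c5, ?_⟩
  · intro j hj hfalse
    rw [List.getD_eq_getElem _ _ (by simpa using hj)] at hfalse
    simp at hfalse
  · intro v j hj _
    have := c1 v j hj
    rwa [Nat.zero_add] at this
  · intro v j hj _ hcnt
    have := c4 v j hj hcnt
    rwa [Nat.zero_add] at this
  · intro v j hj
    have := c3 v j hj
    omega

-- ===== VERDICT (by name: the statement is the Claim_ definition above) =====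
theorem find_out_spec : Claim_equal_find_out := by
  intro corr col_names _ _
  unfold Spec_find_out find_out_alt
  exact pvMainLoop ((corr.map List.length).sum) corr col_names _ _ _ _ le_rfl (pvInitInv corr)
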